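-- pv_equiv track=rewrite | github.com/louisalflame/DiceGame | battle.py | findAttrPriors
-- ===== SOURCE A (Python) =====
-- def findAttrPriors(count):
--     priors = sorted(count.items(), key=lambda x: x[1]['double'], reverse=True)
--
--     attrDoublePriors = list()
--     tmpPriors = []
--     for prior in priors:
--         if not tmpPriors or prior[1]['double'] == tmpPriors[0][1]['double']:
--             tmpPriors.append(prior)
--         else:
--             attrDoublePriors.append(tmpPriors)
--             tmpPriors = [prior]
--     attrDoublePriors.append(tmpPriors)
--
--     attrPriors = list()
--     for priors in attrDoublePriors:
--         basePriors = sorted(priors, key=lambda x: x[1]['base'], reverse=True)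
--         tmpPriors = []
--         for prior in basePriors:
--             if not tmpPriors or prior[1]['base'] == tmpPriors[0][1]['base']:
--                 tmpPriors.append(prior)
--             else:
--                 attrPriors.append(tmpPriors)
--                 tmpPriors = [prior]
--         attrPriors.append(tmpPriors)
--     return attrPriors
-- ===== SOURCE B (Python) =====
-- def findAttrPriors(count):
--     groups = {}
--     for key, val in count.items():
--         groups.setdefault((val['double'], val['base']), []).append((key, val))
--     return [groups[p] for p in sorted(groups, reverse=True)]
-- ===== Notes on version B (the rewrite author's own statement) =====
-- stated objective: idiomatic
-- what changed: A's two cascaded sort-then-run-group passes (sort by double, group, re-sort each group by base, group again) are replaced by one dict that buckets items by their (double, base) pair in a single pass, followed by one sort of the distinct pair keys in descending order.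
-- intended difference: On the empty dict A returns [[]] (one spurious empty group, an artefact of unconditionally appending the running group after the loop), while B returns [], the intended 'no items, no groups' value. — e.g. on findAttrPriors([]): A returns [[]], B returns []
import Mathlib
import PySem

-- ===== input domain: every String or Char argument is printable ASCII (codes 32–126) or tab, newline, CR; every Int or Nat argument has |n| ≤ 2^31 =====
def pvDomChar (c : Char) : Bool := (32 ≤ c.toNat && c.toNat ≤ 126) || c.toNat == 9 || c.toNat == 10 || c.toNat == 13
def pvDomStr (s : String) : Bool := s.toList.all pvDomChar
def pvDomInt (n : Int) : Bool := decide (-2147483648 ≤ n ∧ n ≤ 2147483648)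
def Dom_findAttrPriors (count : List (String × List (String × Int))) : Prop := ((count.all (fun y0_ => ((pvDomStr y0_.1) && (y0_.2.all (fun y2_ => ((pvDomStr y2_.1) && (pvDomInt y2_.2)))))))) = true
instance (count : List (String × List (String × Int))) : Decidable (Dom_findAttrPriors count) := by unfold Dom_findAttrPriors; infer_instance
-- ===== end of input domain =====

-- B groups the items into a dict keyed by the (double, base) pair in one pass and then
-- sorts the distinct pairs once, descending; A sorts twice and scans for runs twice.
-- Python B mutates nothing; equivalence is about the return value.

-- ===== PORT A =====
def pvDbl (p : String × List (String × Int)) : Int := (List.lookup "double" p.2).getD 0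
def pvBse (p : String × List (String × Int)) : Int := (List.lookup "base" p.2).getD 0
abbrev pvItm := String × List (String × Int)
def pvGStep (key : pvItm → Int)
    (st : List (List pvItm) × List pvItm) (prior : pvItm) :
    List (List pvItm) × List pvItm :=
  match st.2 with
  | [] => (st.1, st.2 ++ [prior])
  | h0 :: _ => if key prior = key h0 then (st.1, st.2 ++ [prior]) else (st.1 ++ [st.2], [prior])

def findAttrPriors (count : List (String × List (String × Int))) : List (List (String × (List (String × Int)))) :=
  let priors := PySem.List.sorted count (fun x => pvDbl x) true
  let st := priors.foldl (pvGStep pvDbl) ([], [])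
  let attrDoublePriors := st.1 ++ [st.2]
  attrDoublePriors.foldl (fun acc priors' =>
    let basePriors := PySem.List.sorted priors' (fun x => pvBse x) true
    let st2 := basePriors.foldl (pvGStep pvBse) (acc, [])
    st2.1 ++ [st2.2]) []


-- ===== PORT B =====
def findAttrPriors_alt (count : List (String × List (String × Int))) : List (List (String × (List (String × Int)))) :=
  let groups := count.foldl (fun d p => d.modify (pvDbl p, pvBse p) [] (· ++ [p])) PySem.Dict.empty
  let ks := PySem.List.sorted groups.keys (fun q => toLex q) true
  ks.map (fun q => groups.getD q [])


-- ===== PRECONDITION & SPEC =====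
-- Pre_ excludes exactly the inputs on which Python A raises KeyError: an item whose inner
-- dict lacks the key 'double' or 'base'.
def Pre_findAttrPriors (count : List (String × List (String × Int))) : Prop :=
  ∀ p ∈ count, (List.lookup "double" p.2).isSome ∧ (List.lookup "base" p.2).isSome
instance (count : List (String × List (String × Int))) : Decidable (Pre_findAttrPriors count) := by unfold Pre_findAttrPriors; infer_instance
def pvWitness_findAttrPriors : (List (String × List (String × Int))) :=
  [("a", [("double", 1), ("base", 2)]), ("b", [("double", 1), ("base", 2)]), ("c", [("double", 0), ("base", 5)])]

-- On the empty dict A returns [[]] (one spurious empty group, an artefact of unconditionally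
-- appending the running group after the loop), while B returns [], the intended value.
def D_findAttrPriors (count : List (String × List (String × Int))) : Prop := count = []
instance (count : List (String × List (String × Int))) : Decidable (D_findAttrPriors count) := by unfold D_findAttrPriors; infer_instance
def Spec_findAttrPriors (count : List (String × List (String × Int))) (out : List (List (String × (List (String × Int))))) : Prop := ¬ D_findAttrPriors count → out = findAttrPriors_alt count
instance (count : List (String × List (String × Int))) (out : List (List (String × (List (String × Int))))) : Decidable (Spec_findAttrPriors count out) := by unfold Spec_findAttrPriors; infer_instance
def pvDiffWitness_findAttrPriors : (List (String × List (String × Int))) := []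
def pvDiffWitnessOut_findAttrPriors : (List (List (String × (List (String × Int))))) × (List (List (String × (List (String × Int))))) := ([[]], [])

-- ===== CLAIM (what is proved, stated in full; the proofs are below) =====
def Claim_unchanged_findAttrPriors : Prop := ∀ (count : List (String × List (String × Int))), Dom_findAttrPriors count → Pre_findAttrPriors count → Spec_findAttrPriors count (findAttrPriors count)
def Claim_changed_findAttrPriors : Prop := Dom_findAttrPriors (pvDiffWitness_findAttrPriors) ∧ Pre_findAttrPriors (pvDiffWitness_findAttrPriors) ∧ D_findAttrPriors (pvDiffWitness_findAttrPriors) ∧ findAttrPriors (pvDiffWitness_findAttrPriors) = pvDiffWitnessOut_findAttrPriors.1 ∧ findAttrPriors_alt (pvDiffWitness_findAttrPriors) = pvDiffWitnessOut_findAttrPriors.2 ∧ pvDiffWitnessOut_findAttrPriors.1 ≠ pvDiffWitnessOut_findAttrPriors.2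
def Claim_exact_findAttrPriors : Prop := ∀ (count : List (String × List (String × Int))), Dom_findAttrPriors count → Pre_findAttrPriors count → D_findAttrPriors count → findAttrPriors count ≠ findAttrPriors_alt count

-- ===== LEMMAS AND PROOFS =====

def pvInsKey (v : Int) : List Int → List Int
  | [] => [v]
  | k :: t => if k < v then v :: k :: t else if v = k then k :: t else k :: pvInsKey v t

def pvDescKeys {α : Type} (key : α → Int) (l : List α) : List Int :=
  l.foldl (fun ks x => pvInsKey (key x) ks) []

theorem pvMem_insKey (v w : Int) (ks : List Int) : w ∈ pvInsKey v ks ↔ w = v ∨ w ∈ ks := by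
  induction ks with
  | nil => simp [pvInsKey]
  | cons k t ih =>
    simp only [pvInsKey]
    split_ifs with h1 h2
    · simp only [List.mem_cons]
    · subst h2; simp only [List.mem_cons]; tauto
    · simp only [List.mem_cons, ih]; tauto

theorem pvPairwise_insKey (v : Int) (ks : List Int)
    (h : ks.Pairwise (fun a b => b < a)) : (pvInsKey v ks).Pairwise (fun a b => b < a) := by
  induction ks with
  | nil => simp [pvInsKey]
  | cons k t ih =>
    rw [List.pairwise_cons] at h
    simp only [pvInsKey]
    split_ifs with h1 h2
    · refine List.pairwise_cons.2 ⟨?_, List.pairwise_cons.2 ⟨h.1, h.2⟩⟩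
      intro b hb
      rcases List.mem_cons.1 hb with rfl | hb
      · omega
      · have := h.1 b hb; omega
    · subst h2; exact List.pairwise_cons.2 ⟨h.1, h.2⟩
    · refine List.pairwise_cons.2 ⟨?_, ih h.2⟩
      intro b hb
      rcases (pvMem_insKey v b t).1 hb with rfl | hb
      · omega
      · exact h.1 b hb

theorem pvDescKeys_append {α : Type} (key : α → Int) (l : List α) (x : α) :
    pvDescKeys key (l ++ [x]) = pvInsKey (key x) (pvDescKeys key l) := by
  simp [pvDescKeys, List.foldl_append]

theorem pvMem_descKeys {α : Type} (key : α → Int) (l : List α) (v : Int) :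
    v ∈ pvDescKeys key l ↔ ∃ x ∈ l, key x = v := by
  induction l using List.reverseRecOn with
  | nil => simp [pvDescKeys]
  | append_singleton l x ih =>
    rw [pvDescKeys_append, pvMem_insKey, ih]
    simp only [List.mem_append, List.mem_singleton]
    constructor
    · rintro (rfl | ⟨y, hy, rfl⟩)
      · exact ⟨x, Or.inr rfl, rfl⟩
      · exact ⟨y, Or.inl hy, rfl⟩
    · rintro ⟨y, (hy | rfl), rfl⟩
      · exact Or.inr ⟨y, hy, rfl⟩
      · exact Or.inl rfl

theorem pvPairwise_descKeys {α : Type} (key : α → Int) (l : List α) :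
    (pvDescKeys key l).Pairwise (fun a b => b < a) := by
  induction l using List.reverseRecOn with
  | nil => simp [pvDescKeys]
  | append_singleton l x ih => rw [pvDescKeys_append]; exact pvPairwise_insKey _ _ ih

theorem pvDescKeys_ne_nil {α : Type} (key : α → Int) (l : List α) (h : l ≠ []) :
    pvDescKeys key l ≠ [] := by
  obtain ⟨y, t, rfl⟩ := List.exists_cons_of_ne_nil h
  intro hc
  have : key y ∈ pvDescKeys key (y :: t) := (pvMem_descKeys _ _ _).2 ⟨y, by simp⟩
  rw [hc] at this; simp at this

theorem pvInsertBy_skip {α : Type} (bef : α → α → Bool) (x : α) (B t : List α)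
    (h : ∀ b ∈ B, bef x b = false) :
    PySem.List.insertBy bef x (B ++ t) = B ++ PySem.List.insertBy bef x t := by
  induction B with
  | nil => simp
  | cons b B ih =>
    have hb : bef x b = false := h b (by simp)
    simp only [List.cons_append, PySem.List.insertBy, hb]
    simp [ih (fun c hc => h c (by simp [hc]))]

theorem pvFlatMap_noins {α : Type} (key : α → Int) (x : α) (t : List Int) (F : Int → List α)
    (ht : ∀ v ∈ t, key x ≠ v) :
    t.flatMap (fun v => F v ++ if key x = v then [x] else []) = t.flatMap F := by
  induction t with
  | nil => simp
  | cons k t ih =>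
    simp only [List.flatMap_cons, if_neg (ht k (by simp)), List.append_nil]
    rw [ih (fun v hv => ht v (by simp [hv]))]

theorem pvInsertBy_flatMap {α : Type} (key : α → Int) (x : α) (ks : List Int) (F : Int → List α)
    (hdesc : ks.Pairwise (fun a b => b < a))
    (hkeys : ∀ v ∈ ks, ∀ y ∈ F v, key y = v)
    (hne : ∀ v ∈ ks, F v ≠ [])
    (hnot : key x ∉ ks → F (key x) = []) :
    PySem.List.insertBy (fun a b => decide (key b < key a)) x (ks.flatMap F) =
      (pvInsKey (key x) ks).flatMap (fun v => F v ++ if key x = v then [x] else []) := by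
  induction ks with
  | nil =>
    simp [PySem.List.insertBy, pvInsKey, hnot]
  | cons k t ih =>
    rw [List.pairwise_cons] at hdesc
    obtain ⟨b, B, hFk⟩ := List.exists_cons_of_ne_nil (hne k (by simp))
    have hkb : key b = k := hkeys k (by simp) b (by rw [hFk]; simp)
    rcases lt_trichotomy k (key x) with h1 | h1 | h1
    · -- x strictly above the first block: front
      have hnotmem : key x ∉ k :: t := by
        intro hm; rcases List.mem_cons.1 hm with rfl | hm
        · omega
        · have := hdesc.1 _ hm; omega
      have hF : F (key x) = [] := hnot hnotmem
      have hx_ne_k : ¬ (key x = k) := by omega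
      have ht : ∀ v ∈ t, key x ≠ v := by
        intro v hv; have := hdesc.1 v hv; omega
      have hbef : (decide (key b < key x) : Bool) = true := by simp [hkb]; omega
      simp only [pvInsKey, if_pos h1, List.flatMap_cons, hFk, List.cons_append,
        PySem.List.insertBy, hbef, if_true, hF, List.nil_append, if_neg hx_ne_k,
        List.append_nil, pvFlatMap_noins key x t F ht]
    · -- same key as first block: stable, end of the block
      have hskip : ∀ c ∈ F k, (decide (key c < key x) : Bool) = false := by
        intro c hc; have := hkeys k (by simp) c hc; simp; omega
      have ht : ∀ v ∈ t, key x ≠ v := by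
        intro v hv; have := hdesc.1 v hv; omega
      have hins : PySem.List.insertBy (fun a b => decide (key b < key a)) x (t.flatMap F) =
          x :: t.flatMap F := by
        cases t with
        | nil => simp [PySem.List.insertBy]
        | cons k1 t' =>
          obtain ⟨b1, B1, hFk1⟩ := List.exists_cons_of_ne_nil (hne k1 (by simp))
          have hkb1 : key b1 = k1 := hkeys k1 (by simp) b1 (by rw [hFk1]; simp)
          have : (decide (key b1 < key x) : Bool) = true := by
            have := hdesc.1 k1 (by simp); simp [hkb1]; omega
          simp only [List.flatMap_cons, hFk1, List.cons_append, PySem.List.insertBy, this,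
            if_true]
      rw [List.flatMap_cons, pvInsertBy_skip _ _ _ _ hskip, hins]
      have hnn : ¬ (k < key x) := by omega
      simp only [pvInsKey, if_neg hnn, if_pos h1.symm, List.flatMap_cons,
        pvFlatMap_noins key x t F ht]
      simp
    · -- below the first block: skip it and recurse
      have hskip : ∀ c ∈ F k, (decide (key c < key x) : Bool) = false := by
        intro c hc; have := hkeys k (by simp) c hc; simp; omega
      have hnn : ¬ (k < key x) := by omega
      have hne' : ¬ (key x = k) := by omega
      rw [List.flatMap_cons, pvInsertBy_skip _ _ _ _ hskip,
        ih hdesc.2 (fun v hv => hkeys v (by simp [hv])) (fun v hv => hne v (by simp [hv]))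
          (fun hm => hnot (by simp [hne']; exact fun h => absurd h hm))]
      simp only [pvInsKey, if_neg hnn, List.flatMap_cons, if_neg hne',
        List.append_nil]

theorem pvSortedRev_eq {α : Type} (key : α → Int) (l : List α) :
    PySem.List.sorted l key true =
      (pvDescKeys key l).flatMap (fun v => l.filter (fun x => decide (key x = v))) := by
  induction l using List.reverseRecOn with
  | nil => simp [PySem.List.sorted, pvDescKeys]
  | append_singleton l x ih =>
    rw [PySem.List.sorted_rev_eq_foldl_insertBy] at ih ⊢
    rw [List.foldl_append, List.foldl_cons, List.foldl_nil, ih, pvDescKeys_append]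
    rw [pvInsertBy_flatMap key x _ _ (pvPairwise_descKeys key l)
      (fun v _ y hy => by simpa using (List.mem_filter.1 hy).2)
      (fun v hv => by
        obtain ⟨y, hy, rfl⟩ := (pvMem_descKeys key l v).1 hv
        simp only [ne_eq, List.filter_eq_nil_iff, not_forall]
        exact ⟨y, hy, by simp⟩)
      (fun hm => by
        rw [List.filter_eq_nil_iff]
        intro y hy hc
        exact hm ((pvMem_descKeys key l _).2 ⟨y, hy, by simpa using hc⟩))]
    refine List.flatMap_congr ?_
    intro v _
    rw [List.filter_append, List.filter_singleton]
    simp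

theorem pvGStep_empty (key : pvItm → Int) (acc : List (List pvItm)) (p : pvItm) :
    pvGStep key (acc, []) p = (acc, [p]) := rfl

theorem pvGStep_run (key : pvItm → Int) (B : List pvItm) :
    ∀ (acc : List (List pvItm)) (h : pvItm) (tmp' : List pvItm),
      (∀ b ∈ B, key b = key h) →
      List.foldl (pvGStep key) (acc, h :: tmp') B = (acc, (h :: tmp') ++ B) := by
  induction B with
  | nil => simp
  | cons b B ih =>
    intro acc h tmp' hk
    have hb : key b = key h := hk b (by simp)
    have : pvGStep key (acc, h :: tmp') b = (acc, h :: (tmp' ++ [b])) := by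
      simp [pvGStep, hb]
    rw [List.foldl_cons, this, ih acc h (tmp' ++ [b]) (fun c hc => hk c (by simp [hc]))]
    simp

theorem pvFold_groups (key : pvItm → Int) :
    ∀ (ks : List Int), ks ≠ [] → ∀ (F : Int → List pvItm),
      (∀ v ∈ ks, ∀ y ∈ F v, key y = v) → (∀ v ∈ ks, F v ≠ []) →
      ks.Pairwise (fun a b => b < a) →
      ∀ acc, (List.foldl (pvGStep key) (acc, []) (ks.flatMap F)).1 ++
             [(List.foldl (pvGStep key) (acc, []) (ks.flatMap F)).2] = acc ++ ks.map F := by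
  intro ks
  induction ks with
  | nil => intro h; exact absurd rfl h
  | cons k t ih =>
    intro _ F hkeys hne hdesc acc
    rw [List.pairwise_cons] at hdesc
    obtain ⟨b, B, hFk⟩ := List.exists_cons_of_ne_nil (hne k (by simp))
    have hkb : key b = k := hkeys k (by simp) b (by rw [hFk]; simp)
    have hrun : List.foldl (pvGStep key) (acc, []) (F k) = (acc, F k) := by
      rw [hFk, List.foldl_cons, pvGStep_empty,
        pvGStep_run key B acc b [] (fun c hc => by
          rw [hkb]; exact (hkeys k (by simp) c (by rw [hFk]; simp [hc])).trans rfl)]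
      simp
    rw [List.flatMap_cons, List.foldl_append, hrun]
    cases t with
    | nil => simp
    | cons k1 t' =>
      obtain ⟨b1, B1, hFk1⟩ := List.exists_cons_of_ne_nil (hne k1 (by simp))
      have hkb1 : key b1 = k1 := hkeys k1 (by simp) b1 (by rw [hFk1]; simp)
      have hne1 : key b1 ≠ key b := by rw [hkb1, hkb]; have := hdesc.1 k1 (by simp); omega
      have hstep : pvGStep key (acc, F k) b1 = (acc ++ [F k], [b1]) := by
        rw [hFk]; simp [pvGStep, hne1]
      have hstep' : pvGStep key (acc ++ [F k], []) b1 = (acc ++ [F k], [b1]) := pvGStep_empty ..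
      have hflat : (k1 :: t').flatMap F = b1 :: (B1 ++ t'.flatMap F) := by
        rw [List.flatMap_cons, hFk1]; simp
      rw [hflat, List.foldl_cons, hstep, ← hstep', ← List.foldl_cons, ← hflat]
      rw [ih (by simp) F (fun v hv => hkeys v (by simp [hv])) (fun v hv => hne v (by simp [hv]))
        hdesc.2 (acc ++ [F k])]
      simp

-- ---- B side ----
theorem pvDict_getD (count : List pvItm) (c : Int × Int) :
    ((count.foldl (fun d p => d.modify (pvDbl p, pvBse p) [] (· ++ [p]))
        PySem.Dict.empty).getD c []) =
      count.filter (fun p => (pvDbl p, pvBse p) == c) := by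
  have h := List.foldl_map (f := fun p : pvItm => ((pvDbl p, pvBse p), p))
    (g := fun (d : PySem.Dict (Int × Int) (List pvItm)) q => d.modify q.1 [] (· ++ [q.2]))
    (l := count) (init := (PySem.Dict.empty : PySem.Dict (Int × Int) (List pvItm)))
  simp only at h
  rw [← h, PySem.Dict.getD_foldl_modify_append]
  rw [List.filter_map, List.map_map]
  simp [Function.comp_def]

theorem pvDict_keys (count : List pvItm) :
    (count.foldl (fun d p => d.modify (pvDbl p, pvBse p) [] (· ++ [p]))
        PySem.Dict.empty).keys =
      PySem.Set.ofList (count.map (fun p => (pvDbl p, pvBse p))) := by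
  induction count using List.reverseRecOn with
  | nil => simp [PySem.Set.ofList]
  | append_singleton l x ih =>
    rw [List.foldl_append, List.foldl_cons, List.foldl_nil, List.map_append,
      PySem.Set.ofList_append]
    rw [PySem.Dict.keys_modify]
    by_cases hc : (List.foldl (fun d p => d.modify (pvDbl p, pvBse p) [] (· ++ [p]))
        PySem.Dict.empty l).contains (pvDbl x, pvBse x)
    · rw [PySem.Dict.keys_insert_of_contains _ _ hc, ih]
      have hm : (pvDbl x, pvBse x) ∈ PySem.Set.ofList (l.map (fun p => (pvDbl p, pvBse p))) := by
        rw [← ih]; exact (PySem.Dict.contains_iff_mem_keys _ _).1 hc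
      simp [PySem.Set.update, PySem.Set.add_of_mem hm]
    · rw [PySem.Dict.keys_insert_of_not_contains _ _ (by simpa using hc), ih]
      have hm : (pvDbl x, pvBse x) ∉ PySem.Set.ofList (l.map (fun p => (pvDbl p, pvBse p))) := by
        rw [← ih]; exact fun h => hc ((PySem.Dict.contains_iff_mem_keys _ _).2 h)
      simp [PySem.Set.update, PySem.Set.add_of_not_mem hm]

-- ---- the two pair sequences ----
def pvRLex (p q : Int × Int) : Prop := q.1 < p.1 ∨ (q.1 = p.1 ∧ q.2 < p.2)

def pvBK (l : List pvItm) (v : Int) : List Int :=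
  pvDescKeys pvBse (l.filter (fun x => decide (pvDbl x = v)))

def pvPA (l : List pvItm) : List (Int × Int) :=
  (pvDescKeys pvDbl l).flatMap (fun v => (pvBK l v).map (fun w => (v, w)))

theorem pvUniq : ∀ (P Q : List (Int × Int)), P.Pairwise pvRLex → Q.Pairwise pvRLex →
    (∀ r, r ∈ P ↔ r ∈ Q) → P = Q := by
  intro P
  induction P with
  | nil =>
    intro Q _ _ hm
    cases Q with
    | nil => rfl
    | cons q Q' => exact absurd ((hm q).2 (by simp)) (by simp)
  | cons p P' ih =>
    intro Q hP hQ hm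
    cases Q with
    | nil => exact absurd ((hm p).1 (by simp)) (by simp)
    | cons q Q' =>
      rw [List.pairwise_cons] at hP hQ
      have hpq : p = q := by
        by_contra hne
        have h1 : p ∈ Q' := by
          rcases List.mem_cons.1 ((hm p).1 (by simp)) with h | h
          · exact absurd h hne
          · exact h
        have h2 : q ∈ P' := by
          rcases List.mem_cons.1 ((hm q).2 (by simp)) with h | h
          · exact absurd h.symm hne
          · exact h
        have := hQ.1 p h1
        have := hP.1 q h2
        unfold pvRLex at *
        omega
      subst hpq
      have hm' : ∀ r, r ∈ P' ↔ r ∈ Q' := by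
        intro r
        constructor
        · intro hr
          rcases List.mem_cons.1 ((hm r).1 (by simp [hr])) with rfl | h
          · have := hP.1 r hr; unfold pvRLex at this; omega
          · exact h
        · intro hr
          rcases List.mem_cons.1 ((hm r).2 (by simp [hr])) with rfl | h
          · have := hQ.1 r hr; unfold pvRLex at this; omega
          · exact h
      rw [ih Q' hP.2 hQ.2 hm']

theorem pvPA_pairwise_aux (vs : List Int) (G : Int → List Int)
    (hvs : vs.Pairwise (fun a b => b < a)) (hG : ∀ v, (G v).Pairwise (fun a b => b < a)) :
    (vs.flatMap (fun v => (G v).map (fun w => (v, w)))).Pairwise pvRLex := by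
  induction vs with
  | nil => simp
  | cons v t ih =>
    rw [List.pairwise_cons] at hvs
    rw [List.flatMap_cons]
    rw [List.pairwise_append]
    refine ⟨?_, ih hvs.2, ?_⟩
    · rw [List.pairwise_map]
      exact (hG v).imp (fun h => Or.inr ⟨rfl, h⟩)
    · intro a ha b hb
      obtain ⟨w, _, rfl⟩ := List.mem_map.1 ha
      obtain ⟨v', hv', hb'⟩ := List.mem_flatMap.1 hb
      obtain ⟨w', _, rfl⟩ := List.mem_map.1 hb'
      exact Or.inl (by simpa using hvs.1 v' hv')

theorem pvPA_pairwise (l : List pvItm) : (pvPA l).Pairwise pvRLex :=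
  pvPA_pairwise_aux _ _ (pvPairwise_descKeys _ _) (fun _ => pvPairwise_descKeys _ _)

theorem pvMem_PA (l : List pvItm) (q : Int × Int) :
    q ∈ pvPA l ↔ ∃ p ∈ l, (pvDbl p, pvBse p) = q := by
  unfold pvPA pvBK
  constructor
  · intro hq
    obtain ⟨v, hv, hq'⟩ := List.mem_flatMap.1 hq
    obtain ⟨w, hw, rfl⟩ := List.mem_map.1 hq'
    obtain ⟨p, hp, rfl⟩ := (pvMem_descKeys _ _ _).1 hw
    have := List.mem_filter.1 hp
    exact ⟨p, this.1, by simpa using (by simpa using this.2 : pvDbl p = v) ▸ rfl⟩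
  · rintro ⟨p, hp, rfl⟩
    refine List.mem_flatMap.2 ⟨pvDbl p, (pvMem_descKeys _ _ _).2 ⟨p, hp, rfl⟩, ?_⟩
    refine List.mem_map.2 ⟨pvBse p, (pvMem_descKeys _ _ _).2 ⟨p, ?_, rfl⟩, rfl⟩
    exact List.mem_filter.2 ⟨hp, by simp⟩

-- per-group second stage
theorem pvStage2 : ∀ (gs : List (List pvItm)), (∀ g ∈ gs, g ≠ []) → ∀ acc,
    List.foldl (fun acc priors' =>
      let basePriors := PySem.List.sorted priors' (fun x => pvBse x) true
      let st2 := basePriors.foldl (pvGStep pvBse) (acc, [])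
      st2.1 ++ [st2.2]) acc gs
    = acc ++ gs.flatMap (fun g => (pvDescKeys pvBse g).map
        (fun w => g.filter (fun x => decide (pvBse x = w)))) := by
  intro gs
  induction gs with
  | nil => simp
  | cons g t ih =>
    intro hne acc
    rw [List.foldl_cons]
    have hg : g ≠ [] := hne g (by simp)
    have hstep : (let basePriors := PySem.List.sorted g (fun x => pvBse x) true
        let st2 := basePriors.foldl (pvGStep pvBse) (acc, [])
        st2.1 ++ [st2.2]) = acc ++ (pvDescKeys pvBse g).map
          (fun w => g.filter (fun x => decide (pvBse x = w))) := by
      simp only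
      rw [pvSortedRev_eq pvBse g]
      exact pvFold_groups pvBse (pvDescKeys pvBse g) (pvDescKeys_ne_nil _ _ hg) _
        (fun v _ y hy => by simpa using (List.mem_filter.1 hy).2)
        (fun v hv => by
          obtain ⟨y, hy, rfl⟩ := (pvMem_descKeys pvBse g v).1 hv
          simp only [ne_eq, List.filter_eq_nil_iff, not_forall]
          exact ⟨y, hy, by simp⟩)
        (pvPairwise_descKeys _ _) acc
    rw [hstep, ih (fun g' hg' => hne g' (by simp [hg'])) _]
    simp

theorem pvA_char (count : List pvItm) (h : count ≠ []) :
    findAttrPriors count =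
      (pvPA count).map (fun q => count.filter (fun p => decide ((pvDbl p, pvBse p) = q))) := by
  unfold findAttrPriors
  simp only
  rw [pvSortedRev_eq pvDbl count]
  rw [pvFold_groups pvDbl (pvDescKeys pvDbl count) (pvDescKeys_ne_nil _ _ h)
    (fun v => count.filter (fun x => decide (pvDbl x = v)))
    (fun v _ y hy => by simpa using (List.mem_filter.1 hy).2)
    (fun v hv => by
      obtain ⟨y, hy, rfl⟩ := (pvMem_descKeys pvDbl count v).1 hv
      simp only [ne_eq, List.filter_eq_nil_iff, not_forall]
      exact ⟨y, hy, by simp⟩)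
    (pvPairwise_descKeys _ _) []]
  rw [pvStage2 _ (fun g hg => by
    obtain ⟨v, hv, rfl⟩ := List.mem_map.1 hg
    obtain ⟨y, hy, rfl⟩ := (pvMem_descKeys pvDbl count v).1 hv
    simp only [ne_eq, List.filter_eq_nil_iff, not_forall]
    exact ⟨y, hy, by simp⟩) []]
  rw [List.nil_append, List.nil_append, List.flatMap_map]
  unfold pvPA pvBK
  rw [List.map_flatMap]
  refine List.flatMap_congr ?_
  intro v _
  rw [List.map_map]
  refine List.map_congr_left ?_
  intro w _
  simp only [Function.comp]
  rw [List.filter_filter]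
  refine List.filter_congr ?_
  intro a _
  by_cases h1 : pvDbl a = v <;> by_cases h2 : pvBse a = w <;>
    simp [h1, h2, Prod.ext_iff]

theorem pvB_char (count : List pvItm) :
    findAttrPriors_alt count =
      (PySem.List.sorted (PySem.Set.ofList (count.map (fun p => (pvDbl p, pvBse p))))
          (fun q => toLex q) true).map
        (fun q => count.filter (fun p => decide ((pvDbl p, pvBse p) = q))) := by
  unfold findAttrPriors_alt
  simp only
  rw [pvDict_keys]
  refine List.map_congr_left ?_
  intro q _
  rw [pvDict_getD]
  refine List.filter_congr ?_
  intro a _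
  by_cases h1 : (pvDbl a, pvBse a) = q <;> simp [h1]

theorem pvPB_pairwise (count : List pvItm) :
    (PySem.List.sorted (PySem.Set.ofList (count.map (fun p => (pvDbl p, pvBse p))))
        (fun q => toLex q) true).Pairwise pvRLex := by
  have h1 := PySem.List.sorted_pairwise_rev
    (PySem.Set.ofList (count.map (fun p => (pvDbl p, pvBse p)))) (fun q : Int × Int => toLex q)
  have h2 : (PySem.List.sorted (PySem.Set.ofList (count.map (fun p => (pvDbl p, pvBse p))))
      (fun q : Int × Int => toLex q) true).Nodup := by
    have hperm := PySem.List.sorted_perm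
      (PySem.Set.ofList (count.map (fun p => (pvDbl p, pvBse p)))) (fun q : Int × Int => toLex q) true
    exact hperm.symm.nodup (PySem.Set.nodup_ofList _)
  refine (h1.and h2).imp ?_
  intro a b hab
  have hne : toLex b ≠ toLex a := fun he => hab.2 (toLex.injective he).symm
  have hlt : toLex b < toLex a := lt_of_le_of_ne hab.1 hne
  rw [Prod.Lex.lt_iff] at hlt
  simpa [pvRLex] using hlt

theorem pv_main : ∀ (count : List (String × List (String × Int))), count ≠ [] →
    findAttrPriors count = findAttrPriors_alt count := by
  intro count h
  rw [pvA_char count h, pvB_char count]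
  congr 1
  refine pvUniq _ _ (pvPA_pairwise count) (pvPB_pairwise count) ?_
  intro r
  rw [pvMem_PA, PySem.List.mem_sorted, PySem.Set.mem_ofList]
  simp

-- ===== VERDICT (by name: the statement is the Claim_ definition above) =====
theorem findAttrPriors_spec : Claim_unchanged_findAttrPriors := by
  intro count _ _ hD
  exact pv_main count hD

theorem findAttrPriors_changed : Claim_changed_findAttrPriors := by
  unfold Claim_changed_findAttrPriors
  refine ⟨by decide, by decide, by decide, by decide, by decide, by decide⟩

theorem findAttrPriors_tight : Claim_exact_findAttrPriors := by
  intro count _ _ hD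
  subst hD
  decide
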